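-- pv_equiv track=rewrite | github.com/Tecnokaizen/aquacenter-api | app/services/excel_reporter.py | _max_severidad
-- ===== SOURCE A (Python) =====
-- INCIDENCIAS_ALTA = {"MA-01", "MA-02", "MA-03", "MA-06", "MA-08", "MA-09", "MA-10"}
--
-- INCIDENCIAS_MEDIA = {"MA-04", "MA-05", "MA-07", "MA-11", "MA-12"}
--
-- def _max_severidad(motivos: list) -> str:
--     for m in motivos:
--         if m in INCIDENCIAS_ALTA:
--             return "alta"
--     for m in motivos:
--         if m in INCIDENCIAS_MEDIA:
--             return "media"
--     return "baja"
-- ===== SOURCE B (Python) =====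
-- INCIDENCIAS_ALTA = {"MA-01", "MA-02", "MA-03", "MA-06", "MA-08", "MA-09", "MA-10"}
-- INCIDENCIAS_MEDIA = {"MA-04", "MA-05", "MA-07", "MA-11", "MA-12"}
--
-- def _max_severidad(motivos: list) -> str:
--     has_media = False
--     for m in motivos:
--         if m in INCIDENCIAS_ALTA:
--             return "alta"
--         if m in INCIDENCIAS_MEDIA:
--             has_media = True
--     return "media" if has_media else "baja"
-- ===== Notes on version B (the rewrite author's own statement) =====
-- stated objective: alternative
-- what changed: Replaced A's two sequential scans of motivos with a single pass carrying a has_media flag; 'alta' short-circuits, 'media' vs 'baja' decided after the loop.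
import Mathlib
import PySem

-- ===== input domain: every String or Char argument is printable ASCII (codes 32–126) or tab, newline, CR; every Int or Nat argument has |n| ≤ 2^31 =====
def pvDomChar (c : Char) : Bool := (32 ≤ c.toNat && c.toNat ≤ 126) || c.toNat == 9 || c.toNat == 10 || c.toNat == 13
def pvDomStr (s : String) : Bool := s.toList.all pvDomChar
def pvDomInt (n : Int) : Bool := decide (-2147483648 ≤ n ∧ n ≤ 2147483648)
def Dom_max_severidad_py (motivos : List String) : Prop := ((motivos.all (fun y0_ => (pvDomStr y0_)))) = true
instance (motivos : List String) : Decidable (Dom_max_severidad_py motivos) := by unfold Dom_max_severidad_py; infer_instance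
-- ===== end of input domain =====

-- B replaces A's two sequential scans with one pass carrying a has_media flag (alternative decomposition, same cost).

-- ===== PORT A =====
def pvAlta : PySem.Set String :=
  PySem.Set.ofList ["MA-01", "MA-02", "MA-03", "MA-06", "MA-08", "MA-09", "MA-10"]
def pvMedia : PySem.Set String :=
  PySem.Set.ofList ["MA-04", "MA-05", "MA-07", "MA-11", "MA-12"]

-- first loop of A: return "alta" on first match, else fall through (none)
def pvLoopAlta : List String → Option String
  | [] => none
  | m :: rest => if pvAlta.contains m then some "alta" else pvLoopAlta rest

-- second loop of A
def pvLoopMedia : List String → Option String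
  | [] => none
  | m :: rest => if pvMedia.contains m then some "media" else pvLoopMedia rest

def max_severidad_py (motivos : List String) : String :=
  match pvLoopAlta motivos with
  | some s => s
  | none =>
    match pvLoopMedia motivos with
    | some s => s
    | none => "baja"

-- ===== PORT B =====
-- single pass with has_media accumulator
def pvLoopB : List String → Bool → String
  | [], hasMedia => if hasMedia then "media" else "baja"
  | m :: rest, hasMedia =>
    if pvAlta.contains m then "alta"
    else pvLoopB rest (if pvMedia.contains m then true else hasMedia)

def max_severidad_py_alt (motivos : List String) : String :=
  pvLoopB motivos false

-- ===== PRECONDITION & SPEC =====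
def Spec_max_severidad_py (motivos : List String) (out : String) : Prop := out = max_severidad_py_alt motivos
instance (motivos : List String) (out : String) : Decidable (Spec_max_severidad_py motivos out) := by unfold Spec_max_severidad_py; infer_instance

-- ===== CLAIM (what is proved, stated in full; the proofs are below) =====
def Claim_equal_max_severidad_py : Prop := ∀ (motivos : List String), Dom_max_severidad_py motivos → Spec_max_severidad_py motivos (max_severidad_py motivos)

-- ===== LEMMAS AND PROOFS =====

-- if the first A-loop finds an alta code, B returns "alta" regardless of the flag
theorem pvLoopB_of_alta (l : List String) (s : String) (h : pvLoopAlta l = some s) :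
    s = "alta" ∧ ∀ b : Bool, pvLoopB l b = "alta" := by
  induction l with
  | nil => simp [pvLoopAlta] at h
  | cons m rest ih =>
    by_cases hm : m ∈ pvAlta
    · simp [pvLoopAlta, hm] at h
      exact ⟨h.symm, fun b => by simp [pvLoopB, hm]⟩
    · simp [pvLoopAlta, hm] at h
      obtain ⟨hs, hb⟩ := ih h
      exact ⟨hs, fun b => by simp [pvLoopB, hm, hb]⟩

-- if no alta code occurs, B computes "media" iff the flag is set or some media code occurs
theorem pvLoopB_of_no_alta (l : List String) (h : pvLoopAlta l = none) (b : Bool) :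
    pvLoopB l b = (if b || l.any (fun m => pvMedia.contains m) then "media" else "baja") := by
  induction l generalizing b with
  | nil => simp [pvLoopB]
  | cons m rest ih =>
    by_cases hm : m ∈ pvAlta
    · simp [pvLoopAlta, hm] at h
    · simp [pvLoopAlta, hm] at h
      by_cases hmed : m ∈ pvMedia
      · simp [pvLoopB, hm, hmed, ih h]
      · simp [pvLoopB, hm, hmed, ih h]

-- the second A-loop characterised by List.any
theorem pvLoopMedia_eq (l : List String) :
    pvLoopMedia l = (if l.any (fun m => pvMedia.contains m) then some "media" else none) := by
  induction l with
  | nil => simp [pvLoopMedia]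
  | cons m rest ih =>
    by_cases hmed : m ∈ pvMedia
    · simp [pvLoopMedia, hmed]
    · simp [pvLoopMedia, hmed, ih]

-- ===== VERDICT (by name: the statement is the Claim_ definition above) =====
theorem max_severidad_py_spec : Claim_equal_max_severidad_py := by
  intro motivos _
  unfold Spec_max_severidad_py max_severidad_py max_severidad_py_alt
  cases hA : pvLoopAlta motivos with
  | some s =>
    obtain ⟨hs, hb⟩ := pvLoopB_of_alta motivos s hA
    simp [hs, hb]
  | none =>
    rw [pvLoopB_of_no_alta motivos hA false, pvLoopMedia_eq]
    by_cases hmed : ∃ x ∈ motivos, x ∈ pvMedia <;> simp [hmed]
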